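-- pv_equiv track=rewrite | github.com/vaibhav2396/DSA | local_maximums.py | local_maximums
-- ===== SOURCE A (Python) =====
-- def local_maximums(grid):
--     rows = len(grid)
--     cols = len(grid[0])
--
--     result = []
--     for i in range(1, rows-1):
--         temp = []
--         for j in range(1, cols-1):
--             maxV = max(
--                     grid[i-1][j-1], grid[i-1][j], grid[i-1][j+1],
--                     grid[i][j-1], grid[i][j], grid[i][j+1],
--                     grid[i+1][j-1], grid[i+1][j], grid[i+1][j+1]
--                 )
--             temp.append(maxV)
--         result.append(temp)
--     return result
-- ===== SOURCE B (Python) =====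
-- def local_maximums(grid):
--     cols = len(grid[0])
--     # separable max filter: horizontal 3-window pass, then vertical 3-window pass
--     H = [[max(row[j - 1], row[j], row[j + 1]) for j in range(1, cols - 1)]
--          for row in grid]
--     return [[max(H[i - 1][j], H[i][j], H[i + 1][j]) for j in range(cols - 2)]
--             for i in range(1, len(grid) - 1)]
-- ===== Notes on version B (the rewrite author's own statement) =====
-- stated objective: alternative
-- what changed: Replaces the combined 9-cell neighborhood scan with the standard separable max-filter decomposition: a horizontal 3-window pass producing an intermediate table H, then a vertical 3-window pass over H.
-- outside the precondition, e.g. on local_maximums([[1, 2, 3], [5]]): A returns [], B raises IndexError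
import Mathlib
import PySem

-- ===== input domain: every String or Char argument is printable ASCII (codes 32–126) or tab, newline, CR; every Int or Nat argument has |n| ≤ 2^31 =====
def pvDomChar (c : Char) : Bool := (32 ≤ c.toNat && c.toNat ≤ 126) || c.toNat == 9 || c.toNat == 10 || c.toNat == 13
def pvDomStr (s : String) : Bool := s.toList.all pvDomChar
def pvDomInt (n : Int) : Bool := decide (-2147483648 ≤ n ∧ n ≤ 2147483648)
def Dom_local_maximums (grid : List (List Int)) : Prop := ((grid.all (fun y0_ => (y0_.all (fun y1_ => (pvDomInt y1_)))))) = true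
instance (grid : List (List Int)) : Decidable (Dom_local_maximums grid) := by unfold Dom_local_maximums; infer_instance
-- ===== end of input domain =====

-- B replaces the 9-cell neighborhood scan by the separable decomposition (horizontal
-- 3-window pass into a table H, then a vertical 3-window pass); same cost class.

-- shared indexing helper: g[a][b] under the in-range precondition
def pvAt (g : List (List Int)) (a b : Int) : Int :=
  PySem.List.pyGetD (PySem.List.pyGetD g a []) b 0

-- ===== PORT A =====
def local_maximums (grid : List (List Int)) : List (List Int) :=
  let rows : Int := grid.length
  let cols : Int := (PySem.List.pyGetD grid 0 []).length
  (PySem.List.pyRange 1 (rows - 1) 1).foldl (fun result i =>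
    result ++ [(PySem.List.pyRange 1 (cols - 1) 1).foldl (fun temp j =>
      temp ++ [max (max (max (max (max (max (max (max
        (pvAt grid (i-1) (j-1)) (pvAt grid (i-1) j)) (pvAt grid (i-1) (j+1)))
        (pvAt grid i (j-1))) (pvAt grid i j)) (pvAt grid i (j+1)))
        (pvAt grid (i+1) (j-1))) (pvAt grid (i+1) j)) (pvAt grid (i+1) (j+1))]) []]) []

-- ===== PORT B =====
def local_maximums_alt (grid : List (List Int)) : List (List Int) :=
  let cols : Int := (PySem.List.pyGetD grid 0 []).length
  let H : List (List Int) := grid.map (fun row =>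
    (PySem.List.pyRange 1 (cols - 1) 1).map (fun j =>
      max (max (PySem.List.pyGetD row (j - 1) 0) (PySem.List.pyGetD row j 0))
        (PySem.List.pyGetD row (j + 1) 0)))
  (PySem.List.pyRange 1 ((grid.length : Int) - 1) 1).map (fun i =>
    (PySem.List.pyRange 0 (cols - 2) 1).map (fun j =>
      max (max (pvAt H (i - 1) j) (pvAt H i j)) (pvAt H (i + 1) j)))

-- ===== PRECONDITION & SPEC =====
-- Pre_ excludes inputs where Python A raises IndexError (a grid with no rows; ragged grids
-- whose later rows are shorter than the first row when at least 3 columns are scanned)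
-- and the ragged two-row corner where A returns [] only because its outer loop is
-- empty while B's horizontal pass still indexes every row and raises IndexError.
def Pre_local_maximums (grid : List (List Int)) : Prop :=
  grid ≠ [] ∧ (3 ≤ (PySem.List.pyGetD grid 0 []).length →
    ∀ row ∈ grid, (PySem.List.pyGetD grid 0 []).length ≤ row.length)
instance (grid : List (List Int)) : Decidable (Pre_local_maximums grid) := by
  unfold Pre_local_maximums; infer_instance
def pvWitness_local_maximums : List (List Int) := [[1, 2, 3], [4, 5, 6], [7, 8, 9]]

def Spec_local_maximums (grid : List (List Int)) (out : List (List Int)) : Prop := out = local_maximums_alt grid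
instance (grid : List (List Int)) (out : List (List Int)) : Decidable (Spec_local_maximums grid out) := by unfold Spec_local_maximums; infer_instance

-- ===== CLAIM (what is proved, stated in full; the proofs are below) =====
def Claim_equal_local_maximums : Prop := ∀ (grid : List (List Int)), Dom_local_maximums grid → Pre_local_maximums grid → Spec_local_maximums grid (local_maximums grid)

-- ===== LEMMAS AND PROOFS =====

-- foldl with append-singleton accumulates a map
theorem pv_foldl_map {α β : Type} (f : α → β) : ∀ (xs : List α) (acc : List β),
    xs.foldl (fun a i => a ++ [f i]) acc = acc ++ xs.map f := by
  intro xs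
  induction xs with
  | nil => simp
  | cons x xs ih => intro acc; simp [List.foldl_cons, ih]

theorem pvAt_eq (g : List (List Int)) (a b : Int) (h0 : 0 ≤ a) (h1 : a < (g.length : Int)) :
    pvAt g a b = PySem.List.pyGetD (g[a.toNat]'(by omega)) b 0 := by
  unfold pvAt
  rw [PySem.List.pyGetD_eq_getElem g [] h0 h1]

theorem pvAt_map (g : List (List Int)) (f : List Int → List Int) (a b : Int)
    (h0 : 0 ≤ a) (h1 : a < (g.length : Int)) :
    pvAt (g.map f) a b = PySem.List.pyGetD (f (g[a.toNat]'(by omega))) b 0 := by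
  unfold pvAt
  rw [PySem.List.pyGetD_eq_getElem (g.map f) [] h0 (by simpa using h1)]
  simp

theorem pv_main (grid : List (List Int)) : local_maximums grid = local_maximums_alt grid := by
  simp only [local_maximums, local_maximums_alt, pv_foldl_map, List.nil_append]
  apply List.map_congr_left
  intro i hi
  obtain ⟨hi1, hi2⟩ := PySem.List.mem_pyRange_one.mp hi
  apply List.ext_getElem
  · simp [PySem.List.length_pyRange_one]; omega
  · intro k hk1 hk2
    simp only [List.getElem_map, PySem.List.getElem_pyRange_one] at *
    simp only [List.length_map, PySem.List.length_pyRange_one] at hk1 hk2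
    rw [pvAt_map _ _ _ _ (by omega) (by omega), pvAt_map _ _ _ _ (by omega) (by omega),
        pvAt_map _ _ _ _ (by omega) (by omega)]
    simp only [zero_add]
    rw [PySem.List.pyGetD_map_pyRange_one _ 1 _ k 0 (by omega),
        PySem.List.pyGetD_map_pyRange_one _ 1 _ k 0 (by omega),
        PySem.List.pyGetD_map_pyRange_one _ 1 _ k 0 (by omega)]
    rw [pvAt_eq grid (i-1) _ (by omega) (by omega), pvAt_eq grid (i-1) _ (by omega) (by omega),
        pvAt_eq grid (i-1) _ (by omega) (by omega), pvAt_eq grid i _ (by omega) (by omega),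
        pvAt_eq grid i _ (by omega) (by omega), pvAt_eq grid i _ (by omega) (by omega),
        pvAt_eq grid (i+1) _ (by omega) (by omega), pvAt_eq grid (i+1) _ (by omega) (by omega),
        pvAt_eq grid (i+1) _ (by omega) (by omega)]
    simp [max_assoc]

-- ===== VERDICT (by name: the statement is the Claim_ definition above) =====
theorem local_maximums_spec : Claim_equal_local_maximums := by
  intro grid _ _
  exact pv_main grid
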